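-- pv_equiv track=rewrite | github.com/DeepakBairagi2025/JARVIS-1.1 | AUTOMATION/JARVIS_AUTOMATION_YOUTUBE/YOUTUBE_VIDEO_HOME/youtube_video_home.py | parse_video_index
-- ===== SOURCE A (Python) =====
-- def parse_video_index(command: str) -> int:
--     words = (command or "").lower().replace("-", " ").split()
--     word_to_num = {
--         "one": 1, "first": 1, "1st": 1,
--         "two": 2, "second": 2, "2nd": 2,
--         "three": 3, "third": 3, "3rd": 3,
--         "four": 4, "fourth": 4, "4th": 4,
--         "five": 5, "fifth": 5, "5th": 5,
--         "six": 6, "sixth": 6, "6th": 6,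
--         "seven": 7, "seventh": 7, "7th": 7,
--         "eight": 8, "eighth": 8, "8th": 8,
--         "nine": 9, "ninth": 9, "9th": 9,
--         "ten": 10, "tenth": 10, "10th": 10,
--     }
--     for i, w in enumerate(words[:-1]):
--         if w == "video":
--             nxt = words[i+1]
--             if nxt.isdigit():
--                 return int(nxt)
--             if nxt in word_to_num:
--                 return word_to_num[nxt]
--     for w in words:
--         if w.isdigit():
--             return int(w)
--         if w in word_to_num:
--             return word_to_num[w]
--     return 0
-- ===== SOURCE B (Python) =====
-- _WORD_TO_NUM = {
--     "one": 1, "first": 1, "1st": 1,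
--     "two": 2, "second": 2, "2nd": 2,
--     "three": 3, "third": 3, "3rd": 3,
--     "four": 4, "fourth": 4, "4th": 4,
--     "five": 5, "fifth": 5, "5th": 5,
--     "six": 6, "sixth": 6, "6th": 6,
--     "seven": 7, "seventh": 7, "7th": 7,
--     "eight": 8, "eighth": 8, "8th": 8,
--     "nine": 9, "ninth": 9, "9th": 9,
--     "ten": 10, "tenth": 10, "10th": 10,
-- }
--
--
-- def _num(w):
--     """Numeric value of a word, or None."""
--     if w.isdigit():
--         return int(w)
--     return _WORD_TO_NUM.get(w)
--
--
-- def parse_video_index(command: str) -> int: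
--     # Single pass holding both candidates instead of two sequential scans.
--     words = (command or "").lower().replace("-", " ").split()
--     n = len(words)
--     video_idx = None
--     fallback_idx = None
--     for i, w in enumerate(words):
--         if video_idx is None and w == "video" and i + 1 < n:
--             v = _num(words[i + 1])
--             if v is not None:
--                 video_idx = v
--         if fallback_idx is None:
--             v = _num(w)
--             if v is not None:
--                 fallback_idx = v
--     if video_idx is not None:
--         return video_idx
--     if fallback_idx is not None:
--         return fallback_idx
--     return 0
-- ===== Notes on version B (the rewrite author's own statement) =====
-- stated objective: alternative
-- what changed: Replaces A's two sequential early-return scans (first for 'video'+number, then for any standalone number) with a single pass over the words that maintains both candidates (video_idx and fallback_idx) at once and picks between them afterwards.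
import Mathlib
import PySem

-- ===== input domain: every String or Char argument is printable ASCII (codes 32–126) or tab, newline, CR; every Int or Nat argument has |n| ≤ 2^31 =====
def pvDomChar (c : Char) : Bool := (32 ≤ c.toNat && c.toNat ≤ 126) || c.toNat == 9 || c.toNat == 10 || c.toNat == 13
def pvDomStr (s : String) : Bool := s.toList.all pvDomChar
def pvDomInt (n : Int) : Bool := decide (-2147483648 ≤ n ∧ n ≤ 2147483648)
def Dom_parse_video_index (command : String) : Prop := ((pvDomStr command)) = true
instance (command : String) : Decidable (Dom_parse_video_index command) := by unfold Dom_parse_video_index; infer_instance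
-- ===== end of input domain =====

-- B fuses A's two sequential early-return scans into a single pass that keeps both candidates; same cost, different decomposition.

-- ===== PORT A =====
-- word_to_num, built in the Python literal's insertion order
def pvWordToNum : PySem.Dict String Int := PySem.Dict.ofList
  [("one", 1), ("first", 1), ("1st", 1),
   ("two", 2), ("second", 2), ("2nd", 2),
   ("three", 3), ("third", 3), ("3rd", 3),
   ("four", 4), ("fourth", 4), ("4th", 4),
   ("five", 5), ("fifth", 5), ("5th", 5),
   ("six", 6), ("sixth", 6), ("6th", 6),
   ("seven", 7), ("seventh", 7), ("7th", 7),
   ("eight", 8), ("eighth", 8), ("8th", 8),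
   ("nine", 9), ("ninth", 9), ("9th", 9),
   ("ten", 10), ("tenth", 10), ("10th", 10)]

-- first loop of A: over enumerate(words[:-1]), looking at words[i+1]; early return = Option
-- (int(nxt) after nxt.isdigit() always succeeds, so ofStr? is some; .getD 0 only discharges the Option)
def pvA_loop1 (words : List String) : List (Int × String) → Option Int
  | [] => none
  | (i, w) :: rest =>
    if w = "video" then
      let nxt := (PySem.List.pyGet? words (i + 1)).getD ""
      if PySem.Str.strIsdigit nxt then some ((PySem.Int.ofStr? nxt).getD 0)
      else
        match PySem.Dict.get? pvWordToNum nxt with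
        | some v => some v
        | none => pvA_loop1 words rest
    else pvA_loop1 words rest

-- second loop of A: first standalone number word
def pvA_loop2 : List String → Option Int
  | [] => none
  | w :: rest =>
    if PySem.Str.strIsdigit w then some ((PySem.Int.ofStr? w).getD 0)
    else
      match PySem.Dict.get? pvWordToNum w with
      | some v => some v
      | none => pvA_loop2 rest

def pvA_core (words : List String) : Int :=
  match pvA_loop1 words (PySem.List.enumerate (PySem.List.slice words none (some (-1)))) with
  | some v => v
  | none =>
    match pvA_loop2 words with
    | some v => v
    | none => 0

def parse_video_index (command : String) : Int :=
  -- (command or "") = command for strings: "" is falsy and 'or' then yields ""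
  pvA_core (PySem.Str.split₀ (PySem.Str.replace (PySem.Str.lower command) "-" " "))

-- ===== PORT B =====
-- _num(w): numeric value of a word, or None
def pvB_num? (w : String) : Option Int :=
  if PySem.Str.strIsdigit w then some ((PySem.Int.ofStr? w).getD 0)
  else PySem.Dict.get? pvWordToNum w

-- loop body of B: update (video_idx, fallback_idx) for one (i, w)
def pvB_step (words : List String) (st : Option Int × Option Int) (p : Int × String) :
    Option Int × Option Int :=
  let vid :=
    if st.1 = none ∧ p.2 = "video" ∧ p.1 + 1 < (words.length : Int) then
      match pvB_num? ((PySem.List.pyGet? words (p.1 + 1)).getD "") with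
      | some v => some v
      | none => st.1
    else st.1
  let fb :=
    if st.2 = none then
      match pvB_num? p.2 with
      | some v => some v
      | none => st.2
    else st.2
  (vid, fb)

def pvB_core (words : List String) : Int :=
  -- final if-chain of B: video_idx if set, else fallback_idx if set, else 0
  match (PySem.List.enumerate words).foldl (pvB_step words) (none, none) with
  | (some v, _) => v
  | (none, some v) => v
  | (none, none) => 0

def parse_video_index_alt (command : String) : Int :=
  pvB_core (PySem.Str.split₀ (PySem.Str.replace (PySem.Str.lower command) "-" " "))

-- ===== PRECONDITION & SPEC =====
def Spec_parse_video_index (command : String) (out : Int) : Prop := out = parse_video_index_alt command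
instance (command : String) (out : Int) : Decidable (Spec_parse_video_index command out) := by unfold Spec_parse_video_index; infer_instance

-- ===== CLAIM (what is proved, stated in full; the proofs are below) =====
def Claim_equal_parse_video_index : Prop := ∀ (command : String), Dom_parse_video_index command → Spec_parse_video_index command (parse_video_index command)

-- ===== LEMMAS AND PROOFS =====

-- the candidate A's first loop extracts at one pair (no bound check: words[:-1] guarantees it)
def pvFA (words : List String) (p : Int × String) : Option Int :=
  if p.2 = "video" then pvB_num? ((PySem.List.pyGet? words (p.1 + 1)).getD "") else none

-- the candidate B's single pass records for video_idx at one pair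
def pvFV (words : List String) (p : Int × String) : Option Int :=
  if p.2 = "video" ∧ p.1 + 1 < (words.length : Int) then
    pvB_num? ((PySem.List.pyGet? words (p.1 + 1)).getD "")
  else none

lemma pvA_loop1_eq_findSome? (words : List String) (ps : List (Int × String)) :
    pvA_loop1 words ps = ps.findSome? (pvFA words) := by
  induction ps with
  | nil => rfl
  | cons p rest ih =>
    obtain ⟨i, w⟩ := p
    simp only [pvA_loop1, pvFA, pvB_num?, List.findSome?_cons]
    split_ifs with h1 h2 <;> simp_all <;> (cases PySem.Dict.get? pvWordToNum _ <;> simp_all)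

lemma pvA_loop2_eq_findSome? (ws : List String) :
    pvA_loop2 ws = ws.findSome? pvB_num? := by
  induction ws with
  | nil => rfl
  | cons w rest ih =>
    simp only [pvA_loop2, pvB_num?, List.findSome?_cons]
    split_ifs with h1 <;> simp_all <;> (cases PySem.Dict.get? pvWordToNum w <;> simp_all)

-- one step of B's fold, componentwise: 'keep if set, else try the candidate'
lemma pvB_step_eq (words : List String) (a b : Option Int) (p : Int × String) :
    pvB_step words (a, b) p = (a.or (pvFV words p), b.or (pvB_num? p.2)) := by
  simp only [pvB_step, pvFV, Prod.mk.injEq]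
  constructor
  · cases a with
    | some x => simp
    | none =>
      simp only [Option.none_or, true_and]
      split_ifs with h
      · cases pvB_num? ((PySem.List.pyGet? words (p.1 + 1)).getD "") <;> rfl
      · rfl
  · cases b with
    | some x => simp
    | none =>
      simp only [Option.none_or]
      cases pvB_num? p.2 <;> rfl

-- B's fold, characterised: each component is its initial value 'or' the first candidate found
lemma pvB_foldl_eq (words : List String) (ps : List (Int × String)) (a b : Option Int) :
    ps.foldl (pvB_step words) (a, b) =
      (a.or (ps.findSome? (pvFV words)), b.or (ps.findSome? (fun p => pvB_num? p.2))) := by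
  induction ps generalizing a b with
  | nil => simp
  | cons p rest ih =>
    simp only [List.foldl_cons, pvB_step_eq, ih, List.findSome?_cons, Prod.mk.injEq]
    constructor <;>
      · first
        | (cases a <;> cases pvFV words p <;> rfl)
        | (cases b <;> cases pvB_num? p.2 <;> rfl)

lemma pvEnumerate_append_singleton {α : Type} (xs : List α) (y : α) (k : Int) :
    PySem.List.enumerate (xs ++ [y]) k
      = PySem.List.enumerate xs k ++ [(k + xs.length, y)] := by
  induction xs generalizing k with
  | nil => simp [PySem.List.enumerate]
  | cons x t ih =>
    simp only [List.cons_append, PySem.List.enumerate, ih, List.length_cons, List.cons_append]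
    have : k + 1 + (t.length : Int) = k + ((t.length + 1 : Nat) : Int) := by push_cast; ring
    rw [this]

lemma pvMem_enumerate_bounds {α : Type} (xs : List α) (k : Int) :
    ∀ p ∈ PySem.List.enumerate xs k, k ≤ p.1 ∧ p.1 < k + xs.length := by
  induction xs generalizing k with
  | nil => simp [PySem.List.enumerate]
  | cons x t ih =>
    intro p hp
    simp only [PySem.List.enumerate, List.mem_cons] at hp
    rcases hp with rfl | hp
    · refine ⟨le_refl _, ?_⟩
      show k < k + ((t.length + 1 : Nat) : Int)
      push_cast; omega
    · have := ih (k + 1) p hp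
      simp only [List.length_cons]
      push_cast
      push_cast at this
      omega

lemma pvFindSome?_congr {α β : Type} (l : List α) (f g : α → Option β)
    (h : ∀ p ∈ l, f p = g p) : l.findSome? f = l.findSome? g := by
  induction l with
  | nil => rfl
  | cons x t ih =>
    simp only [List.findSome?_cons, h x (by simp)]
    cases g x with
    | some v => rfl
    | none => exact ih fun p hp => h p (by simp [hp])

lemma pvFindSome?_enumerate_snd {α β : Type} (xs : List α) (k : Int) (g : α → Option β) :
    (PySem.List.enumerate xs k).findSome? (fun p => g p.2) = xs.findSome? g := by
  induction xs generalizing k with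
  | nil => rfl
  | cons x t ih =>
    simp only [PySem.List.enumerate, List.findSome?_cons]
    cases g x with
    | some v => rfl
    | none => exact ih (k + 1)

-- the two scans agree on every word list
lemma pvCore_eq (words : List String) : pvA_core words = pvB_core words := by
  rcases List.eq_nil_or_concat words with rfl | ⟨xs, y, rfl⟩
  · rfl
  · simp only [List.concat_eq_append]
    unfold pvA_core pvB_core
    rw [pvB_foldl_eq, pvA_loop1_eq_findSome?, pvA_loop2_eq_findSome?]
    have hslice : PySem.List.slice (xs ++ [y]) none (some (-1)) = xs := by
      simp [PySem.List.slice_to_neg_one]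
    rw [hslice]
    rw [pvFindSome?_enumerate_snd (xs ++ [y]) 0 pvB_num?]
    have hfv : (PySem.List.enumerate (xs ++ [y]) 0).findSome? (pvFV (xs ++ [y]))
        = (PySem.List.enumerate xs 0).findSome? (pvFA (xs ++ [y])) := by
      rw [pvEnumerate_append_singleton, List.findSome?_append]
      have hlast : pvFV (xs ++ [y]) ((0 : Int) + xs.length, y) = none := by
        simp only [pvFV]
        rw [if_neg]
        rintro ⟨-, hlt⟩
        simp only [List.length_append, List.length_cons, List.length_nil] at hlt
        push_cast at hlt
        omega
      have hcong : (PySem.List.enumerate xs 0).findSome? (pvFV (xs ++ [y]))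
          = (PySem.List.enumerate xs 0).findSome? (pvFA (xs ++ [y])) := by
        apply pvFindSome?_congr
        intro p hp
        have hb := pvMem_enumerate_bounds xs 0 p hp
        simp only [pvFV, pvFA, List.length_append, List.length_cons, List.length_nil]
        by_cases hv : p.2 = "video"
        · rw [if_pos ⟨hv, by push_cast; omega⟩, if_pos hv]
        · rw [if_neg (fun h => hv h.1), if_neg hv]
      rw [hcong]
      simp only [List.findSome?_cons, List.findSome?_nil, hlast, Option.or_none]
    rw [hfv]
    cases (PySem.List.enumerate xs 0).findSome? (pvFA (xs ++ [y])) <;>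
      cases (xs ++ [y]).findSome? pvB_num? <;> rfl

-- ===== VERDICT (by name: the statement is the Claim_ definition above) =====
theorem parse_video_index_spec : Claim_equal_parse_video_index := by
  intro command _
  unfold Spec_parse_video_index parse_video_index parse_video_index_alt
  exact pvCore_eq _
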